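-- pv_equiv track=rewrite | github.com/nursimadonuk/csci127-assignments | final_2/dict.py | addline
-- ===== SOURCE A (Python) =====
-- def addline(d, line):
--     lower_line = line.lower()
--     list_line = lower_line.split()
--     for word in list_line:
--         first = word[0]
--         if first not in d.keys():
--             d[first] = word
--         elif first in d.keys():
--             values = [d[first] , word]
--             val2 = " ".join(values)
--             d[first] = val2
--
--     return d
-- ===== SOURCE B (Python) =====
-- def addline(d, line):
--     groups = {}
--     for w in line.lower().split():
--         groups.setdefault(w[0], []).append(w)
--     for first, words in groups.items():
--         if first in d:
--             d[first] = " ".join([d[first]] + words)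
--         else:
--             d[first] = " ".join(words)
--     return d
-- ===== Notes on version B (the rewrite author's own statement) =====
-- stated objective: simpler
-- what changed: B first groups the lowercased words into per-first-letter buckets in one pass, then writes each key exactly once with a single join (prepending any pre-existing d[first]), instead of A's per-word lookup-and-rejoin of the growing accumulated string.
import Mathlib
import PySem

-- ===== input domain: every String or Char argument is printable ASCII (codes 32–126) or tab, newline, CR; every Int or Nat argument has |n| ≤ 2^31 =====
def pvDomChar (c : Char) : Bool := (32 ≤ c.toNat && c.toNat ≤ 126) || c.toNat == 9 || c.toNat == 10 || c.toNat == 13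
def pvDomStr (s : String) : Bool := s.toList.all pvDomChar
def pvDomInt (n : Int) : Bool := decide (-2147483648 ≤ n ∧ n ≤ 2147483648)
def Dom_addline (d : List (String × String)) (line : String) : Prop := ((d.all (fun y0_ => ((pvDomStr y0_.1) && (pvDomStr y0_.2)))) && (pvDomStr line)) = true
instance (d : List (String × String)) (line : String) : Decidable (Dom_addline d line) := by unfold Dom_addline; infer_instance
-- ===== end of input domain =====

-- B groups the lowered words by first letter in one pass, then writes each key once with a single join
-- (objective: simpler — one dict write and one join per distinct letter instead of per word); both
-- Pythons mutate d in place and return it: the equivalence proved here is about the RETURN value only.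

-- ===== PORT A =====
-- word[0] as a 1-character string; words produced by split() are nonempty, so the 'none'
-- (IndexError) arm is unreachable on every input either port ever feeds to this helper.
def pyFirst (word : String) : String :=
  match PySem.Str.pyGet? word 0 with
  | some c => String.ofList [c]
  | none => ""

-- body of A's 'for word in list_line' loop (the if / elif chain, transcribed branch for branch)
def addlineStep (d : PySem.Dict String String) (word : String) : PySem.Dict String String :=
  let first := pyFirst word
  if d.contains first = false then d.insert first word
  else if d.contains first = true then d.insert first (PySem.Str.join " " [d.getD first "", word])
  else d

def addline (d : List (String × String)) (line : String) : List (String × String) :=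
  let lower_line := PySem.Str.lower line
  let list_line := PySem.Str.split₀ lower_line
  (list_line.foldl addlineStep (PySem.Dict.mk d)).items

-- ===== PORT B =====
-- body of B's grouping loop: groups.setdefault(w[0], []).append(w)
def groupStep (g : PySem.Dict String (List String)) (w : String) : PySem.Dict String (List String) :=
  g.modify (pyFirst w) [] (fun ws => ws ++ [w])

-- body of B's merging loop over groups.items()
def mergeStep (dd : PySem.Dict String String) (kv : String × List String) : PySem.Dict String String :=
  if dd.contains kv.1 then dd.insert kv.1 (PySem.Str.join " " (dd.getD kv.1 "" :: kv.2))
  else dd.insert kv.1 (PySem.Str.join " " kv.2)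

def addline_alt (d : List (String × String)) (line : String) : List (String × String) :=
  let groups := (PySem.Str.split₀ (PySem.Str.lower line)).foldl groupStep PySem.Dict.empty
  (groups.items.foldl mergeStep (PySem.Dict.mk d)).items

-- ===== PRECONDITION & SPEC =====
def Spec_addline (d : List (String × String)) (line : String) (out : List (String × String)) : Prop := out = addline_alt d line
instance (d : List (String × String)) (line : String) (out : List (String × String)) : Decidable (Spec_addline d line out) := by unfold Spec_addline; infer_instance

-- ===== CLAIM (what is proved, stated in full; the proofs are below) =====
def Claim_equal_addline : Prop := ∀ (d : List (String × String)) (line : String), Dom_addline d line → Spec_addline d line (addline d line)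

-- ===== LEMMAS AND PROOFS =====

-- " ".join(ps + [y]) = " ".join([" ".join(ps), y]) for nonempty ps, on the List Char side
theorem chars_join_append (sep : List Char) (ps : List (List Char)) (y : List Char) (h : ps ≠ []) :
    PySem.Chars.join sep (ps ++ [y]) = PySem.Chars.join sep ps ++ sep ++ y := by
  induction ps with
  | nil => exact absurd rfl h
  | cons p rest ih =>
    cases rest with
    | nil => simp [PySem.Chars.join_cons_cons, PySem.Chars.join_singleton]
    | cons q rs =>
      have := ih (by simp)
      simp only [List.cons_append, PySem.Chars.join_cons_cons] at this ⊢
      simp [this]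

-- the same fact lifted to PySem.Str.join
theorem str_join_append (ps : List String) (y : String) (h : ps ≠ []) :
    PySem.Str.join " " (ps ++ [y]) = PySem.Str.join " " [PySem.Str.join " " ps, y] := by
  have hc : (PySem.Str.join " " (ps ++ [y])).toList = (PySem.Str.join " " [PySem.Str.join " " ps, y]).toList := by
    simp only [PySem.Str.toList_join, List.map_append, List.map_cons, List.map_nil]
    rw [chars_join_append _ _ _ (by simpa using h)]
    simp [PySem.Chars.join_cons_cons, PySem.Chars.join_singleton, List.append_assoc]
  exact String.toList_inj.mp hc

theorem str_join_single (y : String) : PySem.Str.join " " [y] = y := by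
  have : (PySem.Str.join " " [y]).toList = y.toList := by
    simp [PySem.Str.toList_join, PySem.Chars.join_singleton]
  exact String.toList_inj.mp this

-- two inserts at distinct keys commute as Dicts when the first key is already present
theorem insert_comm_of_contains {κ ν : Type} [BEq κ] [LawfulBEq κ] (d : PySem.Dict κ ν)
    (k k' : κ) (a v : ν) (hne : k' ≠ k) (hc : d.contains k = true) :
    (d.insert k a).insert k' v = (d.insert k' v).insert k a := by
  have hck : (d.insert k' v).contains k = true := by
    simp [PySem.Dict.contains_insert, hc]
  apply PySem.Dict.ext
  by_cases hc' : d.contains k' = true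
  · have h1 : (d.insert k a).contains k' = true := by
      simp [PySem.Dict.contains_insert, hc']
    rw [PySem.Dict.items_insert_of_contains _ _ h1, PySem.Dict.items_insert_of_contains _ _ hc,
        PySem.Dict.items_insert_of_contains _ _ hck, PySem.Dict.items_insert_of_contains _ _ hc']
    simp only [List.map_map]
    apply List.map_congr_left
    intro p _
    by_cases hpk : p.1 = k <;> by_cases hpk' : p.1 = k' <;>
      simp_all [Function.comp]
  · replace hc' : d.contains k' = false := by simpa using hc'
    have h1 : (d.insert k a).contains k' = false := by
      simp only [PySem.Dict.contains_insert]
      simp [hne, hc']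
    rw [PySem.Dict.items_insert_of_not_contains _ _ h1, PySem.Dict.items_insert_of_contains _ _ hc,
        PySem.Dict.items_insert_of_contains _ _ hck, PySem.Dict.items_insert_of_not_contains _ _ hc']
    simp [List.map_append, hne]

-- merging (k, b ++ [w]) = merging (k, b) and then running A's step on w, for k = pyFirst w
theorem merge_snoc (dd : PySem.Dict String String) (w : String) (b : List String) (hb : b ≠ []) :
    mergeStep dd (pyFirst w, b ++ [w]) = addlineStep (mergeStep dd (pyFirst w, b)) w := by
  set k := pyFirst w with hk
  by_cases hc : dd.contains k = true
  · unfold mergeStep addlineStep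
    simp only [← hk, hc, if_pos, PySem.Dict.contains_insert_self, Bool.true_eq_false,
      PySem.Dict.getD_insert_self, PySem.Dict.insert_insert_self, reduceIte]
    rw [← List.cons_append, str_join_append _ _ (by simp)]
  · replace hc : dd.contains k = false := by simpa using hc
    unfold mergeStep addlineStep
    simp only [← hk, hc, PySem.Dict.contains_insert_self, Bool.true_eq_false, Bool.false_eq_true,
      PySem.Dict.getD_insert_self, PySem.Dict.insert_insert_self, if_false, if_true]
    rw [str_join_append _ _ hb]

-- A's step at w commutes past a merge at a different key, once key pyFirst w is present
theorem merge_step_comm (dd : PySem.Dict String String) (w : String) (k' : String) (b' : List String)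
    (hne : k' ≠ pyFirst w) (hc : dd.contains (pyFirst w) = true) :
    mergeStep (addlineStep dd w) (k', b') = addlineStep (mergeStep dd (k', b')) w := by
  set k := pyFirst w with hk
  have hA : addlineStep dd w = dd.insert k (PySem.Str.join " " [dd.getD k "", w]) := by
    unfold addlineStep
    simp [← hk, hc]
  set V := if dd.contains k' = true then PySem.Str.join " " (dd.getD k' "" :: b') else PySem.Str.join " " b' with hV
  have hM : mergeStep dd (k', b') = dd.insert k' V := by
    unfold mergeStep
    by_cases h : dd.contains k' = true <;> simp [h] at hV ⊢ <;> rw [hV]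
  have hMA : mergeStep (addlineStep dd w) (k', b') =
      (dd.insert k (PySem.Str.join " " [dd.getD k "", w])).insert k' V := by
    rw [hA]; unfold mergeStep
    by_cases h : dd.contains k' = true <;>
      simp [PySem.Dict.contains_insert, PySem.Dict.getD_insert, hne, h] at hV ⊢ <;> rw [hV]
  have hAM : addlineStep (mergeStep dd (k', b')) w =
      (dd.insert k' V).insert k (PySem.Str.join " " [dd.getD k "", w]) := by
    rw [hM]; unfold addlineStep
    simp [PySem.Dict.contains_insert, PySem.Dict.getD_insert, Ne.symm hne, hc, ← hk]
  rw [hMA, hAM, insert_comm_of_contains dd k k' _ _ hne hc]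

theorem merge_step_comm_list (l : List (String × List String)) (X : PySem.Dict String String) (w : String)
    (hl : ∀ p ∈ l, p.1 ≠ pyFirst w) (hc : X.contains (pyFirst w) = true) :
    l.foldl mergeStep (addlineStep X w) = addlineStep (l.foldl mergeStep X) w := by
  induction l generalizing X with
  | nil => rfl
  | cons kv rest ih =>
    obtain ⟨k', b'⟩ := kv
    have h1 : k' ≠ pyFirst w := hl (k', b') (by simp)
    simp only [List.foldl_cons]
    rw [merge_step_comm X w k' b' h1 hc]
    apply ih _ (fun p hp => hl p (by simp [hp]))
    -- contains is preserved by mergeStep (an insert at k' ≠ pyFirst w)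
    unfold mergeStep
    split <;> simp [PySem.Dict.contains_insert, hc]

-- core: merging the grouping updated by one word = merging the old grouping, then A's step on that word
theorem group_merge_core (g : PySem.Dict String (List String)) (dd : PySem.Dict String String) (w : String)
    (hn : g.keys.Nodup) (hb : ∀ p ∈ g.items, p.2 ≠ []) :
    (groupStep g w).items.foldl mergeStep dd = addlineStep (g.items.foldl mergeStep dd) w := by
  set k := pyFirst w with hk
  unfold groupStep PySem.Dict.modify
  by_cases hc : g.contains k = true
  · -- the key already has a bucket: its (unique, nonempty) entry gets w appended
    obtain ⟨q, hmem, hqk⟩ := List.any_eq_true.mp hc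
    have hq1 : q.1 = k := by simpa using hqk
    obtain ⟨b, hqb⟩ : ∃ b, q = (k, b) := ⟨q.2, by rw [← hq1]⟩
    subst hqb
    have hgd : g.getD k [] = b := PySem.Dict.getD_of_mem_items g hmem hn []
    obtain ⟨l1, l2, hsplit⟩ := List.append_of_mem hmem
    have hkeys := hn
    rw [PySem.Dict.keys, hsplit] at hkeys
    simp only [List.map_append, List.map_cons, List.nodup_append, List.nodup_cons] at hkeys
    have hl1 : ∀ p ∈ l1, p.1 ≠ k := by
      intro p hp h
      exact hkeys.2.2 p.1 (List.mem_map_of_mem hp) k (by simp) h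
    have hl2 : ∀ p ∈ l2, p.1 ≠ k := by
      intro p hp h
      exact hkeys.2.1.1 (h ▸ List.mem_map_of_mem hp)
    have hmap1 : List.map (fun p => if (p.1 == k) = true then (k, b ++ [w]) else p) l1 = l1 :=
      (List.map_congr_left (fun q hq => by simp [hl1 q hq])).trans (List.map_id l1)
    have hmap2 : List.map (fun p => if (p.1 == k) = true then (k, b ++ [w]) else p) l2 = l2 :=
      (List.map_congr_left (fun q hq => by simp [hl2 q hq])).trans (List.map_id l2)
    have hitems : (g.insert k (g.getD k [] ++ [w])).items = l1 ++ (k, b ++ [w]) :: l2 := by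
      rw [PySem.Dict.items_insert_of_contains _ _ hc, hgd, hsplit]
      simp only [List.map_append, List.map_cons]
      rw [hmap1, hmap2]
      simp
    rw [hitems, hsplit]
    simp only [List.foldl_append, List.foldl_cons]
    rw [merge_snoc _ _ _ (hb (k, b) hmem)]
    apply merge_step_comm_list _ _ _ hl2
    unfold mergeStep
    split <;> exact PySem.Dict.contains_insert_self _ _ _
  · -- fresh key: the new singleton bucket lands at the end
    replace hc : g.contains k = false := by simpa using hc
    rw [PySem.Dict.getD_of_not_contains _ _ hc, PySem.Dict.items_insert_of_not_contains _ _ hc,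
        List.foldl_append]
    simp only [List.nil_append, List.foldl_cons, List.foldl_nil]
    generalize g.items.foldl mergeStep dd = X
    unfold mergeStep addlineStep
    by_cases h : X.contains k = true <;> simp [← hk, h, str_join_single]

-- groupStep preserves the invariants
theorem groupStep_nodup (g : PySem.Dict String (List String)) (w : String) (hn : g.keys.Nodup) :
    (groupStep g w).keys.Nodup := by
  unfold groupStep PySem.Dict.modify
  by_cases hc : g.contains (pyFirst w) = true
  · rw [PySem.Dict.keys_insert_of_contains _ _ hc]; exact hn
  · replace hc : g.contains (pyFirst w) = false := by simpa using hc
    rw [PySem.Dict.keys_insert_of_not_contains _ _ hc]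
    have : pyFirst w ∉ g.keys := by
      have := PySem.Dict.contains_eq_decide_mem_keys g (pyFirst w)
      rw [hc] at this
      simpa using this.symm
    simp [List.nodup_append, hn]
    exact fun a ha h => this (h ▸ ha)

theorem groupStep_buckets (g : PySem.Dict String (List String)) (w : String)
    (hb : ∀ p ∈ g.items, p.2 ≠ []) : ∀ p ∈ (groupStep g w).items, p.2 ≠ [] := by
  intro p hp
  unfold groupStep PySem.Dict.modify at hp
  by_cases hc : g.contains (pyFirst w) = true
  · rw [PySem.Dict.items_insert_of_contains _ _ hc] at hp
    obtain ⟨q, hq, rfl⟩ := List.mem_map.mp hp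
    by_cases hqk : (q.1 == pyFirst w) = true <;> simp [hqk]
    · exact hb q hq
  · replace hc : g.contains (pyFirst w) = false := by simpa using hc
    rw [PySem.Dict.items_insert_of_not_contains _ _ hc] at hp
    rcases List.mem_append.mp hp with h | h
    · exact hb p h
    · simp at h
      simp [h]

theorem main_fold (ws : List String) (g : PySem.Dict String (List String)) (dd : PySem.Dict String String)
    (hn : g.keys.Nodup) (hb : ∀ p ∈ g.items, p.2 ≠ []) :
    (ws.foldl groupStep g).items.foldl mergeStep dd = ws.foldl addlineStep (g.items.foldl mergeStep dd) := by
  induction ws generalizing g with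
  | nil => rfl
  | cons w ws ih =>
    simp only [List.foldl_cons]
    rw [ih (groupStep g w) (groupStep_nodup g w hn) (groupStep_buckets g w hb),
        group_merge_core g dd w hn hb]

-- ===== VERDICT (by name: the statement is the Claim_ definition above) =====
theorem addline_spec : Claim_equal_addline := by
  intro d line _
  unfold Spec_addline addline addline_alt
  simp only []
  rw [main_fold _ PySem.Dict.empty (PySem.Dict.mk d) (by simp [PySem.Dict.keys_empty]) (by intro p hp; simp [PySem.Dict.empty] at hp)]
  rfl
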